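-- pv_equiv track=rewrite | github.com/Tphuong612/Python_Ptit | DanhSach/pykt086_Chuyển đổi nhị phân.py | convert
-- ===== SOURCE A (Python) =====
-- def convert(sum, a):
--     if sum == 0:
--         return 0
--
--     base = '0123456789ABCDEF'
--     kq = ""
--     while sum!=0:
--         p = base[sum%a]
--         kq += p
--         sum //= a
--     return kq[::-1]
-- ===== SOURCE B (Python) =====
-- def convert(sum, a):
--     if sum == 0:
--         return 0
--     base = '0123456789ABCDEF'
--     # phase 1: count how many digits the repeated-division expansion has
--     d = 0
--     t = sum
--     while t != 0:
--         t //= a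
--         d += 1
--     # phase 2: recompute digit i (the value after i floor divisions, mod a)
--     # for i = d-1 .. 0, emitting the string most-significant-first directly
--     out = ""
--     for i in range(d - 1, -1, -1):
--         q = sum
--         for _ in range(i):
--             q //= a
--         out += base[q % a]
--     return out
-- ===== Notes on version B (the rewrite author's own statement) =====
-- stated objective: alternative
-- what changed: Replaced A's single lsb-first accumulate-then-reverse loop by a two-phase algorithm: first count the digits, then recompute each digit msb-first by repeated floor division, so the string is built in final order with no accumulator reversal.
-- outside the precondition, e.g. on convert(0, 2): A returns 0, B returns 0; on convert(5, 20): A returns '5', B returns '5'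
import Mathlib
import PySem

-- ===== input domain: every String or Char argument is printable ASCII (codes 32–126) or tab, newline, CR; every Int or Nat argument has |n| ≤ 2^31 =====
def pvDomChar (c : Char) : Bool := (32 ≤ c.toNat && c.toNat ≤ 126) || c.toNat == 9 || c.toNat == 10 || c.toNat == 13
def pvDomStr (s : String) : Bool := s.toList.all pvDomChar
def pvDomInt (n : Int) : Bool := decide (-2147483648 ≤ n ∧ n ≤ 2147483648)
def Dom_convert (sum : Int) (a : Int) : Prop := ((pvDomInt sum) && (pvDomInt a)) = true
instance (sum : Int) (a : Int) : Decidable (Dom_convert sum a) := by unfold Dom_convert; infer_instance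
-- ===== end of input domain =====

-- B replaces A's lsb-first accumulator loop + final [::-1] reversal by a two-phase
-- algorithm: count the digits, then recompute each digit msb-first by repeated floor
-- division (objective: alternative; not faster). When sum == 0 both Pythons return the
-- int 0 (not a string), which Pre_ excludes.


-- ===== PORT A =====
def pvBase : List Char := "0123456789ABCDEF".toList

-- the while-loop: appends base[sum % a] to kq, then sum //= a, while sum != 0
-- (fuel |sum| + 33 only makes the recursion total; inside Pre_ the loop runs < fuel steps:
--  at most the bit length of sum for 2 ≤ a, at most 33 for -16 ≤ a ≤ -2 and |sum| ≤ 2^31;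
--  .getD ' ' totalises the IndexError case, which Pre_ excludes)
def convertLoopA : Nat → Int → Int → List Char → List Char
  | 0, _, _, kq => kq
  | f + 1, sum, a, kq =>
    if sum == 0 then kq
    else
      let p := (PySem.List.pyGet? pvBase (PySem.Int.mod sum a)).getD ' '
      convertLoopA f (PySem.Int.floordiv sum a) a (kq ++ [p])

def convert (sum : Int) (a : Int) : String :=
  if sum == 0 then "0"   -- Python returns the int 0 here (excluded by Pre_)
  else String.ofList ((convertLoopA (sum.natAbs + 33) sum a []).reverse)   -- kq[::-1]

-- ===== PORT B =====
-- phase-1 while-loop: d counts how many times t //= a runs before t hits 0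
-- (same fuel-totalisation note as for A's loop)
def countDigitsB : Nat → Int → Int → Int
  | 0, _, _ => 0
  | f + 1, t, a => if t == 0 then 0 else countDigitsB f (PySem.Int.floordiv t a) a + 1

-- the inner 'for _ in range(i): q //= a' loop
def divIterB : Nat → Int → Int → Int
  | 0, q, _ => q
  | i + 1, q, a => divIterB i (PySem.Int.floordiv q a) a

def convert_alt (sum : Int) (a : Int) : String :=
  if sum == 0 then "0"   -- Python returns the int 0 here (excluded by Pre_)
  else
    let d := countDigitsB (sum.natAbs + 33) sum a
    -- for i in range(d-1, -1, -1): out += base[q % a]; every i in this range is ≥ 0,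
    -- so i.toNat is exactly the repetition count range(i) of the inner loop
    String.ofList ((PySem.List.pyRange (d - 1) (-1) (-1)).foldl
      (fun out i =>
        out ++ [(PySem.List.pyGet? pvBase (PySem.Int.mod (divIterB i.toNat sum a) a)).getD ' ']) [])

-- ===== PRECONDITION & SPEC =====
-- Pre_ excludes: sum == 0 (A returns the int 0, not a string); a outside [-16,-2] ∪ [2,16]
-- (A raises IndexError on most inputs via an out-of-range digit index, and on the few small
-- inputs where it still returns, B returns the same value); and sum < 0 with 2 ≤ a
-- (A's loop never terminates there).
def Pre_convert (sum : Int) (a : Int) : Prop :=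
  sum ≠ 0 ∧ ((0 < sum ∧ 2 ≤ a ∧ a ≤ 16) ∨ (-16 ≤ a ∧ a ≤ -2))
instance (sum : Int) (a : Int) : Decidable (Pre_convert sum a) := by unfold Pre_convert; infer_instance
def pvWitness_convert : Int × Int := (10, 2)

def Spec_convert (sum : Int) (a : Int) (out : String) : Prop := out = convert_alt sum a
instance (sum : Int) (a : Int) (out : String) : Decidable (Spec_convert sum a out) := by unfold Spec_convert; infer_instance

-- ===== CLAIM (what is proved, stated in full; the proofs are below) =====
def Claim_equal_convert : Prop := ∀ (sum : Int) (a : Int), Dom_convert sum a → Pre_convert sum a → Spec_convert sum a (convert sum a)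

-- ===== LEMMAS AND PROOFS =====

-- digit character of q in base a (shared shape of both ports' emissions)
def pvChr (q a : Int) : Char :=
  (PySem.List.pyGet? pvBase (PySem.Int.mod q a)).getD ' '

lemma countDigitsB_nonneg (f : Nat) : ∀ (t a : Int), 0 ≤ countDigitsB f t a := by
  induction f with
  | zero => intro t a; simp [countDigitsB]
  | succ f ih =>
    intro t a
    simp only [countDigitsB]
    split
    · exact le_refl 0
    · have := ih (PySem.Int.floordiv t a) a; omega

-- A's loop only appends: the accumulator factors out
lemma convertLoopA_acc (f : Nat) : ∀ (sum a : Int) (kq : List Char),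
    convertLoopA f sum a kq = kq ++ convertLoopA f sum a [] := by
  induction f with
  | zero => intro sum a kq; simp [convertLoopA]
  | succ f ih =>
    intro sum a kq
    by_cases h : sum = 0
    · simp [convertLoopA, h]
    · simp only [convertLoopA, h, beq_iff_eq, if_false]
      rw [ih _ _ (kq ++ _), ih _ _ ([] ++ _)]
      simp

-- the foldl that appends one mapped element per index is init ++ map
lemma foldl_append_singleton (g : Int → Char) :
    ∀ (l : List Int) (init : List Char),
      List.foldl (fun out i => out ++ [g i]) init l = init ++ l.map g := by
  intro l
  induction l with
  | nil => simp
  | cons x xs ih => intro init; simp [List.foldl_cons, ih]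

-- A's residue list (lsb-first), reversed, is B's msb-first digit map
lemma loopA_reverse_eq (f : Nat) : ∀ (sum a : Int),
    (convertLoopA f sum a []).reverse =
      (PySem.List.pyRange (countDigitsB f sum a - 1) (-1) (-1)).map
        (fun i => pvChr (divIterB i.toNat sum a) a) := by
  induction f with
  | zero =>
    intro sum a
    simp [convertLoopA, countDigitsB, PySem.List.pyRange_neg_one_eq_nil (by norm_num : (-1:Int) ≤ -1)]
  | succ f ih =>
    intro sum a
    by_cases h : sum = 0
    · simp [convertLoopA, countDigitsB, h,
        PySem.List.pyRange_neg_one_eq_nil (by norm_num : (-1:Int) ≤ -1)]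
    · have hc' : 0 ≤ countDigitsB f (PySem.Int.floordiv sum a) a :=
        countDigitsB_nonneg f _ a
      have hA : convertLoopA (f + 1) sum a [] =
          [pvChr sum a] ++ convertLoopA f (PySem.Int.floordiv sum a) a [] := by
        simp only [convertLoopA, h, beq_iff_eq, if_false]
        exact convertLoopA_acc f _ a _
      have hcount : countDigitsB (f + 1) sum a
          = countDigitsB f (PySem.Int.floordiv sum a) a + 1 := by
        simp [countDigitsB, h]
      rw [hA, List.reverse_append, ih (PySem.Int.floordiv sum a) a, hcount]
      have hr : PySem.List.pyRange (countDigitsB f (PySem.Int.floordiv sum a) a + 1 - 1) (-1) (-1) =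
          (PySem.List.pyRange 0 (countDigitsB f (PySem.Int.floordiv sum a) a + 1) 1).reverse := by
        rw [PySem.List.pyRange_neg_one_eq_reverse]; norm_num
      rw [hr, List.map_reverse,
        PySem.List.pyRange_one_cons (by omega :
          (0:Int) < countDigitsB f (PySem.Int.floordiv sum a) a + 1)]
      simp only [List.map_cons, List.reverse_cons]
      have h0 : pvChr (divIterB (0:Int).toNat sum a) a = pvChr sum a := by
        simp [divIterB]
      rw [h0]
      congr 1
      have hr2 : PySem.List.pyRange (countDigitsB f (PySem.Int.floordiv sum a) a - 1) (-1) (-1) =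
          (PySem.List.pyRange 0 (countDigitsB f (PySem.Int.floordiv sum a) a) 1).reverse := by
        rw [PySem.List.pyRange_neg_one_eq_reverse]; norm_num
      rw [hr2, List.map_reverse]
      simp only [zero_add]
      rw [PySem.List.pyRange_one 1 (countDigitsB f (PySem.Int.floordiv sum a) a + 1),
        PySem.List.pyRange_one 0 (countDigitsB f (PySem.Int.floordiv sum a) a),
        List.map_map, List.map_map]
      have harg : (countDigitsB f (PySem.Int.floordiv sum a) a + 1 - 1).toNat
          = (countDigitsB f (PySem.Int.floordiv sum a) a - 0).toNat := by omega
      rw [harg]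
      congr 1
      apply List.map_congr_left
      intro k _
      simp only [Function.comp]
      have h1 : ((1:Int) + (k:Int)).toNat = k + 1 := by omega
      have h2 : ((0:Int) + (k:Int)).toNat = k := by omega
      rw [h1, h2]
      rfl

-- ===== VERDICT (by name: the statement is the Claim_ definition above) =====
theorem convert_spec : Claim_equal_convert := by
  intro sum a _ hpre
  unfold Spec_convert convert convert_alt
  have h : ¬ (sum == 0) = true := by simpa using hpre.1
  simp only [h, Bool.false_eq_true, if_false]
  rw [foldl_append_singleton
      (fun i => (PySem.List.pyGet? pvBase (PySem.Int.mod (divIterB i.toNat sum a) a)).getD ' '),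
    loopA_reverse_eq]
  simp [pvChr]
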